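-- pv_equiv track=rewrite | github.com/DrJDen31/ACS_ClasswideProjects | FinalProjects/TrackB/experiments/Experiment1_DRAM_Baseline/scripts/analyze_experiment1.py | _extract_ef_from_name
-- ===== SOURCE A (Python) =====
-- def _extract_ef_from_name(base: str):
--     """Best-effort extraction of the search expansion factor EF from a filename.
--
--     Handles patterns like:
--     - ..._EF_SEARCH-0016.json
--     - ..._efs512_...
--     - ..._ef256_...
--     """
--
--     # Strip extension if present.
--     if base.endswith(".json"):
--         base = base[:-5]
--
--     tokens = base.split("_")
--
--     # Highest priority: explicit EF + SEARCH-XXXX token pairs, e.g. ..._EF_SEARCH-0016.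
--     for i, tok in enumerate(tokens):
--         if tok.upper() == "EF" and i + 1 < len(tokens):
--             nxt = tokens[i + 1]
--             if "SEARCH-" in nxt.upper():
--                 try:
--                     part = nxt.split("SEARCH-", 1)[1]
--                     # Strip any extension like .json
--                     if "." in part:
--                         part = part.split(".", 1)[0]
--                     return int(part)
--                 except Exception:
--                     continue
--
--     # Also handle compact EF_SEARCH-XXXX tokens if they ever appear.
--     for tok in tokens:
--         if "EF_SEARCH-" in tok:
--             try:
--                 part = tok.split("EF_SEARCH-", 1)[1]
--                 if "." in part:
--                     part = part.split(".", 1)[0]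
--                 return int(part)
--             except Exception:
--                 continue
--
--     # Next, look for efsNNN tokens (search ef) such as "efs512".
--     for tok in tokens:
--         t = tok.lower()
--         if t.startswith("efs") and t[3:].isdigit():
--             try:
--                 return int(t[3:])
--             except Exception:
--                 continue
--
--     # Finally, plain efNNN tokens such as "ef256".
--     for tok in tokens:
--         t = tok.lower()
--         if t.startswith("ef") and t[2:].isdigit():
--             try:
--                 return int(t[2:])
--             except Exception:
--                 continue
--
--     return None
-- ===== SOURCE B (Python) =====
-- def _try_int(s):
--     try:
--         return int(s)
--     except ValueError:
--         return None
--
--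
-- def _level1(nxt):
--     """Value of an explicit SEARCH-NNN token (case-sensitive), or None."""
--     pos = nxt.find("SEARCH-")
--     if pos == -1:
--         return None
--     part = nxt[pos + 7:]
--     dot = part.find(".")
--     if dot != -1:
--         part = part[:dot]
--     return _try_int(part)
--
--
-- def _extract_ef_from_name(base: str):
--     """Single-pass re-implementation: scan the tokens once, keeping the best
--     candidate by (priority level, position); level 1 = EF + SEARCH-NNN pair,
--     level 3 = efsNNN, level 4 = efNNN."""
--     if base.endswith(".json"):
--         base = base[:-5]
--     tokens = base.split("_")
--     best = None  # (level, value); lower level wins, first hit per level wins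
--     for i, tok in enumerate(tokens):
--         cand = None
--         low = tok.lower()
--         if tok.upper() == "EF" and i + 1 < len(tokens):
--             v = _level1(tokens[i + 1])
--             if v is not None:
--                 cand = (1, v)
--         elif low.startswith("efs") and low[3:].isdigit():
--             cand = (3, int(low[3:]))
--         elif low.startswith("ef") and low[2:].isdigit():
--             cand = (4, int(low[2:]))
--         if cand is not None and (best is None or cand[0] < best[0]):
--             best = cand
--     return best[1] if best is not None else None
-- ===== Notes on version B (the rewrite author's own statement) =====
-- stated objective: alternative
-- what changed: A makes four sequential full scans over the token list (EF+SEARCH pairs, compact EF_SEARCH tokens, efsNNN, efNNN) returning from the first scan that hits; B does one pass over the tokens, maintaining the best candidate by (priority level, position) and using a case-sensitive find instead of upper-check-then-split, returning the best candidate's value at the end.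
import Mathlib
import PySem

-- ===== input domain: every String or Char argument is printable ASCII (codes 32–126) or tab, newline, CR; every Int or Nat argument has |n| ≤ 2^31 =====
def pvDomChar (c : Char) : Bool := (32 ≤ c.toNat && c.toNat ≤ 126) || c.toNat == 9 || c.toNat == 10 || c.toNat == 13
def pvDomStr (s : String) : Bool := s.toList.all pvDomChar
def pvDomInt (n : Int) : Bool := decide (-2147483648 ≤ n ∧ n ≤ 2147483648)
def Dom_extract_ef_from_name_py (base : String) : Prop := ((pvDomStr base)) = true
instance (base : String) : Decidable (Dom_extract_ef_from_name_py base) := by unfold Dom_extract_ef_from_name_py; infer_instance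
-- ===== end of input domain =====

-- B replaces A's four sequential scans over the token list by a single pass that keeps
-- the best candidate by (priority level, position); return values are proved equal on all inputs.

-- ===== PORT A =====

-- first loop of A: explicit EF + SEARCH-XXXX token pairs (enumerate + tokens[i+1])
def pvLoop1 (tokens : List (List Char)) : List (Int × List Char) → Option Int
  | [] => none
  | (i, tok) :: rest =>
    if PySem.Chars.upper tok = "EF".toList ∧ i + 1 < (tokens.length : Int) then
      match PySem.List.pyGet? tokens (i + 1) with
      | none => pvLoop1 tokens rest      -- unreachable: guarded by i + 1 < len(tokens)
      | some nxt =>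
        if PySem.Chars.isIn "SEARCH-".toList (PySem.Chars.upper nxt) then
          match (PySem.Chars.splitOnMax nxt "SEARCH-".toList 1)[1]? with
          | none => pvLoop1 tokens rest  -- IndexError caught: continue
          | some part0 =>
            match PySem.Int.ofChars? (if PySem.Chars.isIn ['.'] part0 then
                (PySem.Chars.splitOnMax part0 ['.'] 1).headD [] else part0) with
            | some v => some v
            | none => pvLoop1 tokens rest -- ValueError caught: continue
        else pvLoop1 tokens rest
    else pvLoop1 tokens rest

-- second loop of A: compact EF_SEARCH-XXXX tokens
def pvLoop2 : List (List Char) → Option Int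
  | [] => none
  | tok :: rest =>
    if PySem.Chars.isIn "EF_SEARCH-".toList tok then
      match (PySem.Chars.splitOnMax tok "EF_SEARCH-".toList 1)[1]? with
      | none => pvLoop2 rest
      | some part0 =>
        match PySem.Int.ofChars? (if PySem.Chars.isIn ['.'] part0 then
            (PySem.Chars.splitOnMax part0 ['.'] 1).headD [] else part0) with
        | some v => some v
        | none => pvLoop2 rest
    else pvLoop2 rest

-- third loop of A: efsNNN tokens
def pvLoop3 : List (List Char) → Option Int
  | [] => none
  | tok :: rest =>
    if PySem.Chars.startswith (PySem.Chars.lower tok) "efs".toList ∧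
       PySem.Chars.strIsdigit (PySem.Chars.slice (PySem.Chars.lower tok) (some 3) none) then
      match PySem.Int.ofChars? (PySem.Chars.slice (PySem.Chars.lower tok) (some 3) none) with
      | some v => some v
      | none => pvLoop3 rest
    else pvLoop3 rest

-- fourth loop of A: efNNN tokens
def pvLoop4 : List (List Char) → Option Int
  | [] => none
  | tok :: rest =>
    if PySem.Chars.startswith (PySem.Chars.lower tok) "ef".toList ∧
       PySem.Chars.strIsdigit (PySem.Chars.slice (PySem.Chars.lower tok) (some 2) none) then
      match PySem.Int.ofChars? (PySem.Chars.slice (PySem.Chars.lower tok) (some 2) none) with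
      | some v => some v
      | none => pvLoop4 rest
    else pvLoop4 rest

def extract_ef_from_name_py (base : String) : Option Int :=
  let cs0 := base.toList
  let cs := if PySem.Chars.endswith cs0 ".json".toList then PySem.Chars.slice cs0 none (some (-5)) else cs0
  let tokens := PySem.Chars.splitOn cs ['_']
  match pvLoop1 tokens (PySem.List.enumerate tokens 0) with
  | some v => some v
  | none =>
    match pvLoop2 tokens with
    | some v => some v
    | none =>
      match pvLoop3 tokens with
      | some v => some v
      | none => pvLoop4 tokens

-- ===== PORT B =====

-- Source B helper _level1: value of an explicit SEARCH-NNN token (case-sensitive), or none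
def pvLevel1 (nxt : List Char) : Option Int :=
  let pos := PySem.Chars.find nxt "SEARCH-".toList
  if pos = -1 then none
  else
    let part0 := PySem.Chars.slice nxt (some (pos + 7)) none
    let dot := PySem.Chars.find part0 ['.']
    PySem.Int.ofChars? (if dot ≠ -1 then PySem.Chars.slice part0 none (some dot) else part0)

-- Source B loop body: the candidate (level, value) contributed by one token; next? is
-- tokens[i+1] when i+1 < len(tokens), else none
def pvAltCand (tok : List Char) (next? : Option (List Char)) : Option (Nat × Int) :=
  if PySem.Chars.upper tok = "EF".toList ∧ next? ≠ none then
    match next? with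
    | none => none
    | some nxt =>
      match pvLevel1 nxt with
      | some v => some (1, v)
      | none => none
  else if PySem.Chars.startswith (PySem.Chars.lower tok) "efs".toList ∧
          PySem.Chars.strIsdigit (PySem.Chars.slice (PySem.Chars.lower tok) (some 3) none) then
    (PySem.Int.ofChars? (PySem.Chars.slice (PySem.Chars.lower tok) (some 3) none)).map (fun v => (3, v))
  else if PySem.Chars.startswith (PySem.Chars.lower tok) "ef".toList ∧
          PySem.Chars.strIsdigit (PySem.Chars.slice (PySem.Chars.lower tok) (some 2) none) then
    (PySem.Int.ofChars? (PySem.Chars.slice (PySem.Chars.lower tok) (some 2) none)).map (fun v => (4, v))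
  else none

-- Source B best update: keep cand only if it exists and beats best's level strictly
def pvMerge (best cand : Option (Nat × Int)) : Option (Nat × Int) :=
  match best, cand with
  | none, c => c
  | some b, none => some b
  | some b, some c => if c.1 < b.1 then some c else some b

-- Source B single pass over the tokens
def pvScan : List (List Char) → Option (Nat × Int) → Option (Nat × Int)
  | [], best => best
  | tok :: rest, best => pvScan rest (pvMerge best (pvAltCand tok rest.head?))

def extract_ef_from_name_py_alt (base : String) : Option Int :=
  let cs0 := base.toList
  let cs := if PySem.Chars.endswith cs0 ".json".toList then PySem.Chars.slice cs0 none (some (-5)) else cs0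
  let tokens := PySem.Chars.splitOn cs ['_']
  (pvScan tokens none).map (·.2)

-- ===== PRECONDITION & SPEC =====
def Spec_extract_ef_from_name_py (base : String) (out : Option Int) : Prop := out = extract_ef_from_name_py_alt base
instance (base : String) (out : Option Int) : Decidable (Spec_extract_ef_from_name_py base out) := by unfold Spec_extract_ef_from_name_py; infer_instance

-- ===== CLAIM (what is proved, stated in full; the proofs are below) =====
def Claim_equal_extract_ef_from_name_py : Prop := ∀ (base : String), Dom_extract_ef_from_name_py base → Spec_extract_ef_from_name_py base (extract_ef_from_name_py base)

-- ===== LEMMAS AND PROOFS =====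

-- first split of s at sep: some (before, after) around the first occurrence of sep, else none
def pvFS (sep : List Char) : List Char → Option (List Char × List Char)
  | [] => none
  | c :: rest =>
    if sep.isPrefixOf (c :: rest) then some ([], (c :: rest).drop sep.length)
    else (pvFS sep rest).map (fun p => (c :: p.1, p.2))

theorem pvGo0 (sep : List Char) (fuel : Nat) (l cur : List Char) (acc : List (List Char)) :
    PySem.Chars.splitOnMax.go sep fuel 0 l cur acc = ((cur.reverse ++ l) :: acc).reverse := by
  cases fuel with
  | zero => simp [PySem.Chars.splitOnMax.go]
  | succ f => cases l with
    | nil => simp [PySem.Chars.splitOnMax.go]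
    | cons c rest => simp [PySem.Chars.splitOnMax.go]

theorem pvGo1 (sep : List Char) (fuel : Nat) (s cur : List Char) (acc : List (List Char))
    (hf : s.length < fuel) :
    PySem.Chars.splitOnMax.go sep fuel 1 s cur acc =
      match pvFS sep s with
      | none => ((cur.reverse ++ s) :: acc).reverse
      | some (a, b) => acc.reverse ++ [cur.reverse ++ a, b] := by
  induction s generalizing fuel cur acc with
  | nil =>
    cases fuel with
    | zero => omega
    | succ f => simp [PySem.Chars.splitOnMax.go, pvFS]
  | cons c rest ih =>
    cases fuel with
    | zero => omega
    | succ f =>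
      by_cases hp : sep.isPrefixOf (c :: rest)
      · simp only [PySem.Chars.splitOnMax.go, hp, if_pos, pvFS]
        simp [pvGo0]
      · simp only [PySem.Chars.splitOnMax.go, hp, pvFS]
        rw [ih f (c :: cur) acc (by simpa using Nat.lt_of_succ_lt_succ hf)]
        cases h : pvFS sep rest with
        | none => simp
        | some p => cases p with | mk a b => simp

theorem pvSplit1 (sep s : List Char) :
    PySem.Chars.splitOnMax s sep 1 =
      match pvFS sep s with
      | none => [s]
      | some (a, b) => [a, b] := by
  unfold PySem.Chars.splitOnMax
  rw [if_neg (by omega), show ((1 : Int).toNat) = 1 from rfl]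
  rw [pvGo1 sep (s.length + 1) s [] [] (by omega)]
  cases h : pvFS sep s with
  | none => simp
  | some p => cases p with | mk a b => simp

theorem pvFindGo (sep : List Char) (hsep : sep ≠ []) (s : List Char) (k : Nat) :
    PySem.Chars.find.go sep s k =
      match pvFS sep s with
      | none => -1
      | some (a, _) => (k : Int) + a.length := by
  induction s generalizing k with
  | nil =>
    simp [PySem.Chars.find.go, pvFS, List.isEmpty_iff, hsep]
  | cons c rest ih =>
    by_cases hp : sep.isPrefixOf (c :: rest)
    · simp [PySem.Chars.find.go, hp, pvFS]
    · simp only [PySem.Chars.find.go, hp, Bool.false_eq_true, if_false, pvFS]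
      rw [ih (k + 1)]
      cases h : pvFS sep rest with
      | none => simp
      | some p => cases p with | mk a b => push_cast; simp; ring

theorem pvFind_eq (sep : List Char) (hsep : sep ≠ []) (s : List Char) :
    PySem.Chars.find s sep =
      match pvFS sep s with
      | none => -1
      | some (a, _) => (a.length : Int) := by
  unfold PySem.Chars.find
  rw [pvFindGo sep hsep s 0]
  cases h : pvFS sep s with
  | none => rfl
  | some p => cases p with | mk a b => simp

theorem pvFS_decomp (sep : List Char) (s a b : List Char) (h : pvFS sep s = some (a, b)) :
    s = a ++ sep ++ b := by
  induction s generalizing a b with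
  | nil => simp [pvFS] at h
  | cons c rest ih =>
    by_cases hp : sep.isPrefixOf (c :: rest)
    · rw [pvFS, if_pos hp] at h
      obtain ⟨t, ht⟩ := List.isPrefixOf_iff_prefix.mp hp
      injection h with h1
      injection h1 with ha hb
      subst ha
      rw [← hb, ← ht]
      simp
    · rw [pvFS, if_neg hp] at h
      cases h' : pvFS sep rest with
      | none => rw [h'] at h; simp at h
      | some p =>
        cases p with | mk a' b' =>
        rw [h'] at h
        simp at h
        obtain ⟨ha, hb⟩ := h
        subst hb
        rw [← ha]
        simp [ih a' b' h']

theorem pvFS_after (sep : List Char) (s a b : List Char) (h : pvFS sep s = some (a, b)) :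
    s.drop (a.length + sep.length) = b := by
  rw [pvFS_decomp sep s a b h]
  exact List.drop_left' (by simp)

theorem pvFS_before (sep : List Char) (s a b : List Char) (h : pvFS sep s = some (a, b)) :
    s.take a.length = a := by
  rw [pvFS_decomp sep s a b h, List.append_assoc]
  exact List.take_left' rfl

-- A's attempt on the token following an "EF" token (none = the except/continue path)
def pvTry1 (nxt : List Char) : Option Int :=
  if PySem.Chars.isIn "SEARCH-".toList (PySem.Chars.upper nxt) then
    match (PySem.Chars.splitOnMax nxt "SEARCH-".toList 1)[1]? with
    | none => none
    | some part0 =>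
      PySem.Int.ofChars? (if PySem.Chars.isIn ['.'] part0 then
          (PySem.Chars.splitOnMax part0 ['.'] 1).headD [] else part0)
  else none

theorem pvUpperSEARCH : PySem.Chars.upper "SEARCH-".toList = "SEARCH-".toList := by decide

-- the dot-truncation step agrees between A (isIn + split('.',1)[0]) and B (find + slice)
theorem pvDot_eq (part0 : List Char) :
    (if PySem.Chars.isIn ['.'] part0 then (PySem.Chars.splitOnMax part0 ['.'] 1).headD [] else part0)
      = (if PySem.Chars.find part0 ['.'] ≠ -1 then
          PySem.Chars.slice part0 none (some (PySem.Chars.find part0 ['.'])) else part0) := by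
  cases h : pvFS ['.'] part0 with
  | none =>
    have hfind : PySem.Chars.find part0 ['.'] = -1 := by
      rw [pvFind_eq ['.'] (by simp) part0, h]
    have hin : PySem.Chars.isIn ['.'] part0 = false := by
      unfold PySem.Chars.isIn
      simp [hfind]
    rw [if_neg (by simp [hin]), if_neg (by simp [hfind])]
  | some p =>
    cases p with | mk a b =>
    have hfind : PySem.Chars.find part0 ['.'] = (a.length : Int) := by
      rw [pvFind_eq ['.'] (by simp) part0, h]
    have hin : PySem.Chars.isIn ['.'] part0 = true := by
      unfold PySem.Chars.isIn
      simp [hfind]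
    rw [if_pos hin, if_pos (by rw [hfind]; omega)]
    rw [pvSplit1 ['.'] part0, h, hfind]
    have hsl : PySem.Chars.slice part0 none (some (a.length : Int)) = part0.take a.length := by
      simp [PySem.Chars.slice_eq_listSlice, PySem.List.slice_to_natCast]
    rw [hsl, pvFS_before ['.'] part0 a b h]
    rfl

-- A's upper-case-guarded split attempt equals B's case-sensitive find attempt
theorem pvTry_eq (nxt : List Char) : pvTry1 nxt = pvLevel1 nxt := by
  cases h : pvFS "SEARCH-".toList nxt with
  | none =>
    have hfind : PySem.Chars.find nxt "SEARCH-".toList = -1 := by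
      rw [pvFind_eq "SEARCH-".toList (by decide) nxt, h]
    unfold pvTry1 pvLevel1
    simp only [hfind]
    rw [pvSplit1 "SEARCH-".toList nxt, h]
    simp
  | some p =>
    cases p with | mk a b =>
    have hfind : PySem.Chars.find nxt "SEARCH-".toList = (a.length : Int) := by
      rw [pvFind_eq "SEARCH-".toList (by decide) nxt, h]
    have hin : PySem.Chars.isIn "SEARCH-".toList (PySem.Chars.upper nxt) = true := by
      rw [PySem.Chars.isIn_iff_infix]
      have hinf : "SEARCH-".toList <:+: nxt := by
        rw [pvFS_decomp _ _ _ _ h]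
        exact ⟨a, b, by simp⟩
      have := List.IsInfix.map PySem.Chars.upperChar hinf
      simpa [PySem.Chars.upper, pvUpperSEARCH] using this
    have hb : PySem.Chars.slice nxt (some (PySem.Chars.find nxt "SEARCH-".toList + 7)) none = b := by
      rw [hfind, show ((a.length : Int) + 7) = ((a.length + 7 : Nat) : Int) by push_cast; ring]
      rw [PySem.Chars.slice_eq_listSlice, PySem.List.slice_from_natCast]
      exact pvFS_after "SEARCH-".toList nxt a b h
    unfold pvTry1 pvLevel1
    simp only [hb]
    rw [if_pos hin, if_neg (by rw [hfind]; omega)]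
    rw [pvSplit1 "SEARCH-".toList nxt, h]
    simp only [List.getElem?_cons_succ, List.getElem?_cons_zero]
    rw [pvDot_eq b]

-- A's loop-1 body as a single if/match expression, rephrased through pvTry1
theorem pvTry1_step (nxt : List Char) (cont : Option Int) :
    (if PySem.Chars.isIn "SEARCH-".toList (PySem.Chars.upper nxt) then
       match (PySem.Chars.splitOnMax nxt "SEARCH-".toList 1)[1]? with
       | none => cont
       | some part0 =>
         match PySem.Int.ofChars? (if PySem.Chars.isIn ['.'] part0 then
             (PySem.Chars.splitOnMax part0 ['.'] 1).headD [] else part0) with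
         | some v => some v
         | none => cont
     else cont)
    = (match pvTry1 nxt with | some v => some v | none => cont) := by
  unfold pvTry1
  by_cases hin : PySem.Chars.isIn "SEARCH-".toList (PySem.Chars.upper nxt) = true
  · rw [if_pos hin, if_pos hin]
    cases (PySem.Chars.splitOnMax nxt "SEARCH-".toList 1)[1]? with
    | none => rfl
    | some part0 =>
      cases PySem.Int.ofChars? (if PySem.Chars.isIn ['.'] part0 then
          (PySem.Chars.splitOnMax part0 ['.'] 1).headD [] else part0) with
      | none => rfl
      | some v => rfl
  · rw [if_neg hin, if_neg hin]

-- structural version of A's first loop (peek at the next token)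
def pvSA1 : List (List Char) → Option Int
  | [] => none
  | _ :: [] => none
  | tok :: nxt :: rest =>
    if PySem.Chars.upper tok = "EF".toList then
      match pvTry1 nxt with
      | some v => some v
      | none => pvSA1 (nxt :: rest)
    else pvSA1 (nxt :: rest)

theorem pvSA1_skip (tok : List Char) (rest : List (List Char))
    (h : ¬ PySem.Chars.upper tok = "EF".toList) : pvSA1 (tok :: rest) = pvSA1 rest := by
  cases rest with
  | nil => rfl
  | cons nxt rest' => rw [pvSA1, if_neg h]

-- A's indexed first loop equals the structural one
theorem pvLoop1_eq (rest pre : List (List Char)) :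
    pvLoop1 (pre ++ rest) (PySem.List.enumerate rest (pre.length : Int)) = pvSA1 rest := by
  induction rest generalizing pre with
  | nil => simp [pvLoop1, PySem.List.enumerate_nil, pvSA1]
  | cons tok rest' ih =>
    rw [PySem.List.enumerate_cons]
    have hstep : ((pre.length : Int) + 1) = (((pre ++ [tok]).length : Nat) : Int) := by
      simp
    have htail : pre ++ tok :: rest' = (pre ++ [tok]) ++ rest' := by simp
    by_cases hEF : PySem.Chars.upper tok = "EF".toList
    · cases rest' with
      | nil =>
        rw [pvLoop1, if_neg (by
          rintro ⟨-, hlt⟩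
          simp only [List.length_append, List.length_cons, List.length_nil] at hlt
          push_cast at hlt
          omega)]
        simp [pvLoop1, PySem.List.enumerate_nil, pvSA1]
      | cons nxt rest'' =>
        rw [pvLoop1, if_pos ⟨hEF, by
          simp only [List.length_append, List.length_cons]
          push_cast
          omega⟩]
        have hget : PySem.List.pyGet? (pre ++ tok :: nxt :: rest'') ((pre.length : Int) + 1) = some nxt := by
          rw [show ((pre.length : Int) + 1) = (((pre.length + 1 : Nat)) : Int) by push_cast; ring,
              PySem.List.pyGet?_natCast, List.getElem?_append_right (by omega)]
          simp
        have hcont : pvLoop1 (pre ++ tok :: nxt :: rest'')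
            (PySem.List.enumerate (nxt :: rest'') ((pre.length : Int) + 1)) = pvSA1 (nxt :: rest'') := by
          rw [hstep, htail]
          exact ih (pre ++ [tok])
        simp only [hget]
        rw [pvSA1, if_pos hEF, pvTry1_step nxt]
        cases pvTry1 nxt with
        | some v => rfl
        | none => exact hcont
    · rw [pvLoop1, if_neg (fun hc => hEF hc.1), pvSA1_skip tok rest' hEF]
      cases rest' with
      | nil => simp [pvLoop1, PySem.List.enumerate_nil, pvSA1]
      | cons nxt rest'' =>
        rw [hstep, htail]
        exact ih (pre ++ [tok])

-- tokens produced by splitting on '_' never contain '_'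
theorem pvSplitOnGo_us (fuel : Nat) (s cur : List Char) (acc : List (List Char))
    (hf : s.length < fuel) (hcur : '_' ∉ cur) (hacc : ∀ t ∈ acc, '_' ∉ t) :
    ∀ tok ∈ PySem.Chars.splitOn.go ['_'] fuel s cur acc, '_' ∉ tok := by
  induction s generalizing fuel cur acc with
  | nil =>
    cases fuel with
    | zero => omega
    | succ f =>
      intro tok htok
      simp [PySem.Chars.splitOn.go] at htok
      rcases htok with h | h
      · exact hacc tok h
      · subst h; simpa using hcur
  | cons c rest ih =>
    cases fuel with
    | zero => omega
    | succ f =>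
      by_cases hp : List.isPrefixOf ['_'] (c :: rest)
      · rw [PySem.Chars.splitOn.go]
        simp only [hp, if_true]
        apply ih f [] (cur.reverse :: acc) (by simp at hf ⊢; omega) (by simp)
        intro t ht
        simp at ht
        rcases ht with h | h
        · subst h; simpa using hcur
        · exact hacc t h
      · rw [PySem.Chars.splitOn.go]
        simp only [hp, Bool.false_eq_true, if_false]
        apply ih f (c :: cur) acc (by simpa using Nat.lt_of_succ_lt_succ hf)
        · have hc : c ≠ '_' := by
            intro hc
            subst hc
            exact hp (List.isPrefixOf_iff_prefix.mpr ⟨rest, rfl⟩)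
          simp [hcur, Ne.symm hc]
        · exact hacc

theorem pvSplitOn_us (s : List Char) : ∀ tok ∈ PySem.Chars.splitOn s ['_'], '_' ∉ tok := by
  unfold PySem.Chars.splitOn
  exact pvSplitOnGo_us (s.length + 1) s [] [] (by omega) (by simp) (by simp)

-- A's second loop is dead: tokens from split('_') cannot contain 'EF_SEARCH-'
theorem pvLoop2_none (toks : List (List Char)) (h : ∀ tok ∈ toks, '_' ∉ tok) :
    pvLoop2 toks = none := by
  induction toks with
  | nil => rfl
  | cons tok rest ih =>
    have hin : PySem.Chars.isIn "EF_SEARCH-".toList tok = false := by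
      rw [← Bool.not_eq_true, PySem.Chars.isIn_iff_infix]
      intro hinf
      exact h tok (by simp) (hinf.subset (by decide))
    rw [pvLoop2, if_neg (fun hc => Bool.false_ne_true (hin ▸ hc))]
    exact ih (fun t ht => h t (by simp [ht]))

-- a char whose Python upper() is 'E' lowers to 'e' (same for 'F'/'f')
theorem pvLowerChar_E (a : Char) (h : PySem.Chars.upperChar a = 'E') :
    PySem.Chars.lowerChar a = 'e' := by
  unfold PySem.Chars.upperChar at h
  split_ifs at h with h1
  · have hbounds : 97 ≤ a.toNat ∧ a.toNat ≤ 122 := by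
      unfold PySem.Chars.islower at h1
      simp only [Bool.and_eq_true, decide_eq_true_eq] at h1
      constructor
      · have h5 := h1.1
        simp [Char.le_def] at h5
        exact h5
      · have h5 := h1.2
        simp [Char.le_def] at h5
        exact h5
    have h2 : a.toNat - 32 = 69 := by
      have h3 := congrArg Char.toNat h
      rw [Char.toNat_ofNat] at h3
      have hv : (a.toNat - 32).isValidChar := by
        unfold Nat.isValidChar
        omega
      rw [if_pos hv] at h3
      exact h3.trans (by decide)
    have h4 : Char.ofNat a.toNat = Char.ofNat 101 := by
      congr 1
      omega
    rw [Char.ofNat_toNat] at h4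
    rw [h4]
    decide
  · rw [h]
    decide

theorem pvLowerChar_F (a : Char) (h : PySem.Chars.upperChar a = 'F') :
    PySem.Chars.lowerChar a = 'f' := by
  unfold PySem.Chars.upperChar at h
  split_ifs at h with h1
  · have hbounds : 97 ≤ a.toNat ∧ a.toNat ≤ 122 := by
      unfold PySem.Chars.islower at h1
      simp only [Bool.and_eq_true, decide_eq_true_eq] at h1
      constructor
      · have h5 := h1.1
        simp [Char.le_def] at h5
        exact h5
      · have h5 := h1.2
        simp [Char.le_def] at h5
        exact h5
    have h2 : a.toNat - 32 = 70 := by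
      have h3 := congrArg Char.toNat h
      rw [Char.toNat_ofNat] at h3
      have hv : (a.toNat - 32).isValidChar := by
        unfold Nat.isValidChar
        omega
      rw [if_pos hv] at h3
      exact h3.trans (by decide)
    have h4 : Char.ofNat a.toNat = Char.ofNat 102 := by
      congr 1
      omega
    rw [Char.ofNat_toNat] at h4
    rw [h4]
    decide
  · rw [h]
    decide

-- a token whose upper() is "EF" lowers to "ef"
theorem pvEF_lower (tok : List Char) (h : PySem.Chars.upper tok = "EF".toList) :
    PySem.Chars.lower tok = "ef".toList := by
  unfold PySem.Chars.upper at h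
  unfold PySem.Chars.lower
  cases tok with
  | nil => exact absurd (congrArg List.length h) (by simp)
  | cons a t =>
    cases t with
    | nil => exact absurd (congrArg List.length h) (by simp)
    | cons b t' =>
      cases t' with
      | cons c t'' =>
        exact absurd (congrArg List.length h) (by simp)
      | nil =>
        rw [show "EF".toList = ['E', 'F'] from rfl] at h
        simp only [List.map_cons, List.map_nil, List.cons.injEq, and_true] at h
        rw [show "ef".toList = ['e', 'f'] from rfl]
        simp [pvLowerChar_E a h.1, pvLowerChar_F b h.2]

theorem pvMerge_none_right (b : Option (Nat × Int)) : pvMerge b none = b := by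
  cases b <;> rfl

theorem pvMerge_assoc (a b c : Option (Nat × Int)) :
    pvMerge (pvMerge a b) c = pvMerge a (pvMerge b c) := by
  cases a with
  | none => rfl
  | some x =>
    cases b with
    | none => rfl
    | some y =>
      cases c with
      | none => rw [pvMerge_none_right, pvMerge_none_right]
      | some z =>
        by_cases h1 : y.1 < x.1 <;> by_cases h2 : z.1 < y.1 <;> by_cases h3 : z.1 < x.1 <;>
          simp [pvMerge, h1, h2, h3] <;> omega

theorem pvScan_start (toks : List (List Char)) (best : Option (Nat × Int)) :
    pvScan toks best = pvMerge best (pvScan toks none) := by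
  induction toks generalizing best with
  | nil => rw [pvScan, pvScan, pvMerge_none_right]
  | cons tok rest ih =>
    rw [pvScan, pvScan, ih (pvMerge best (pvAltCand tok rest.head?)),
        ih (pvMerge none (pvAltCand tok rest.head?)), pvMerge_assoc]
    rfl

theorem pvAltCand_EF (tok nxt : List Char) (h : PySem.Chars.upper tok = "EF".toList) :
    pvAltCand tok (some nxt) = (pvTry1 nxt).map (fun v => (1, v)) := by
  rw [pvAltCand, if_pos ⟨h, by simp⟩, pvTry_eq]
  cases pvLevel1 nxt <;> rfl

theorem pvLoop3_skip_EF (tok : List Char) (rest : List (List Char))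
    (h : PySem.Chars.lower tok = "ef".toList) : pvLoop3 (tok :: rest) = pvLoop3 rest := by
  rw [pvLoop3, h, if_neg (by decide)]

theorem pvLoop4_skip_EF (tok : List Char) (rest : List (List Char))
    (h : PySem.Chars.lower tok = "ef".toList) : pvLoop4 (tok :: rest) = pvLoop4 rest := by
  rw [pvLoop4, h, if_neg (by decide)]

-- an efsNNN match never also matches the digit test of the ef loop (the char after "ef" is 's')
theorem pvLoop4_skip_efs (tok : List Char) (rest : List (List Char))
    (h : PySem.Chars.startswith (PySem.Chars.lower tok) "efs".toList = true) :
    pvLoop4 (tok :: rest) = pvLoop4 rest := by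
  obtain ⟨t, ht⟩ := (PySem.Chars.startswith_iff _ _).mp h
  rw [pvLoop4, if_neg ?_]
  rintro ⟨-, hdig⟩
  have hs : PySem.Chars.slice (PySem.Chars.lower tok) (some 2) none = (PySem.Chars.lower tok).drop 2 := by
    simp [pysem]
  rw [hs, ← ht] at hdig
  simp [PySem.Chars.strIsdigit, PySem.Chars.isdigit] at hdig

-- full characterisation of B's single pass by A's three live loops
theorem pvScan_char (toks : List (List Char)) :
    pvScan toks none =
      match pvSA1 toks with
      | some v => some (1, v)
      | none =>
        match pvLoop3 toks with
        | some v => some (3, v)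
        | none => (pvLoop4 toks).map (fun v => (4, v)) := by
  induction toks with
  | nil => rfl
  | cons tok rest ih =>
    rw [pvScan, pvScan_start, ih]
    show pvMerge (pvMerge none (pvAltCand tok rest.head?)) _ = _
    by_cases hEF : PySem.Chars.upper tok = "EF".toList
    · have hlow := pvEF_lower tok hEF
      have hL3 := pvLoop3_skip_EF tok rest hlow
      have hL4 := pvLoop4_skip_EF tok rest hlow
      cases rest with
      | nil =>
        have hc : pvAltCand tok ([] : List (List Char)).head? = none := by
          rw [show (([] : List (List Char)).head?) = none from rfl, pvAltCand.eq_def,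
              if_neg (by rintro ⟨-, hn⟩; exact hn rfl), hlow,
              if_neg (by decide), if_neg (by decide)]
        rw [hc, hL3, hL4]
        rfl
      | cons nxt rest' =>
        rw [show (nxt :: rest').head? = some nxt from rfl, pvAltCand_EF tok nxt hEF]
        rw [pvSA1, if_pos hEF, hL3, hL4]
        cases hT : pvTry1 nxt with
        | some v =>
          cases hS1 : pvSA1 (nxt :: rest') <;> cases hS3 : pvLoop3 (nxt :: rest') <;>
            cases hS4 : pvLoop4 (nxt :: rest') <;> simp [pvMerge]
        | none =>
          cases hS1 : pvSA1 (nxt :: rest') <;> cases hS3 : pvLoop3 (nxt :: rest') <;>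
            cases hS4 : pvLoop4 (nxt :: rest') <;> simp [pvMerge]
    · have hA1 := pvSA1_skip tok rest hEF
      have hAc : pvAltCand tok rest.head? =
          (if PySem.Chars.startswith (PySem.Chars.lower tok) "efs".toList ∧
              PySem.Chars.strIsdigit (PySem.Chars.slice (PySem.Chars.lower tok) (some 3) none) then
            (PySem.Int.ofChars? (PySem.Chars.slice (PySem.Chars.lower tok) (some 3) none)).map (fun v => (3, v))
          else if PySem.Chars.startswith (PySem.Chars.lower tok) "ef".toList ∧
              PySem.Chars.strIsdigit (PySem.Chars.slice (PySem.Chars.lower tok) (some 2) none) then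
            (PySem.Int.ofChars? (PySem.Chars.slice (PySem.Chars.lower tok) (some 2) none)).map (fun v => (4, v))
          else none) := by
        rw [pvAltCand.eq_def, if_neg (fun hc => hEF hc.1)]
      by_cases h3 : PySem.Chars.startswith (PySem.Chars.lower tok) "efs".toList = true ∧
          PySem.Chars.strIsdigit (PySem.Chars.slice (PySem.Chars.lower tok) (some 3) none) = true
      · have hL4 := pvLoop4_skip_efs tok rest h3.1
        rw [hAc, if_pos h3, hA1, pvLoop3, if_pos h3, hL4]
        cases hv : PySem.Int.ofChars? (PySem.Chars.slice (PySem.Chars.lower tok) (some 3) none) with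
        | some v =>
          cases hS1 : pvSA1 rest <;> cases hS3 : pvLoop3 rest <;>
            cases hS4 : pvLoop4 rest <;> simp [pvMerge]
        | none =>
          cases hS1 : pvSA1 rest <;> cases hS3 : pvLoop3 rest <;>
            cases hS4 : pvLoop4 rest <;> simp [pvMerge]
      · have hL3 : pvLoop3 (tok :: rest) = pvLoop3 rest := by
          rw [pvLoop3, if_neg h3]
        by_cases h4 : PySem.Chars.startswith (PySem.Chars.lower tok) "ef".toList = true ∧
            PySem.Chars.strIsdigit (PySem.Chars.slice (PySem.Chars.lower tok) (some 2) none) = true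
        · rw [hAc, if_neg h3, if_pos h4, hA1, hL3, pvLoop4, if_pos h4]
          cases hv : PySem.Int.ofChars? (PySem.Chars.slice (PySem.Chars.lower tok) (some 2) none) with
          | some v =>
            cases hS1 : pvSA1 rest <;> cases hS3 : pvLoop3 rest <;>
              cases hS4 : pvLoop4 rest <;> simp [pvMerge]
          | none =>
            cases hS1 : pvSA1 rest <;> cases hS3 : pvLoop3 rest <;>
              cases hS4 : pvLoop4 rest <;> simp [pvMerge]
        · have hL4 : pvLoop4 (tok :: rest) = pvLoop4 rest := by
            rw [pvLoop4, if_neg h4]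
          rw [hAc, if_neg h3, if_neg h4, hA1, hL3, hL4]
          rfl

-- the whole of A on a token list equals the whole of B on the same token list
theorem pvMaster (toks : List (List Char)) (hus : ∀ tok ∈ toks, '_' ∉ tok) :
    (match pvLoop1 toks (PySem.List.enumerate toks 0) with
     | some v => some v
     | none =>
       match pvLoop2 toks with
       | some v => some v
       | none =>
         match pvLoop3 toks with
         | some v => some v
         | none => pvLoop4 toks) = (pvScan toks none).map (·.2) := by
  have h1 : pvLoop1 toks (PySem.List.enumerate toks 0) = pvSA1 toks := by
    simpa using pvLoop1_eq toks []
  rw [h1, pvLoop2_none toks hus, pvScan_char toks]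
  cases hS1 : pvSA1 toks <;> cases hS3 : pvLoop3 toks <;> cases hS4 : pvLoop4 toks <;> simp

-- ===== VERDICT (by name: the statement is the Claim_ definition above) =====
theorem extract_ef_from_name_py_spec : Claim_equal_extract_ef_from_name_py := by
  intro base _
  unfold Spec_extract_ef_from_name_py extract_ef_from_name_py extract_ef_from_name_py_alt
  exact pvMaster _ (pvSplitOn_us _)
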